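-- pv_equiv track=rewrite | github.com/jrjed/advent_of_code_2016 | day4/script4.py | real_info
-- ===== SOURCE A (Python) =====
-- from collections import Counter
--
-- def real_info(info):
--     real_index = []
--     for i, (name, checksum) in enumerate(zip(info['name'], info['checksum'])):
--         if valid(name, checksum):
--             real_index.append(i)
--     for key in info.keys():
--         info[key] = [info[key][i] for i in real_index]
--     return info
--
-- def top_counts(name):
--     counts = Counter(name.replace('-', ''))
--     counts = sorted(counts.items(), key=lambda x: x[0])
--     counts.sort(key=lambda x: x[1], reverse=True)
--     top = [k[0] for k in counts][:5]
--     return top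
--
-- def valid(name, checksum, min_match=5):
--     results = [n in top_counts(name) for n in checksum]
--     if sum(results) == min_match:
--         return True
--     else:
--         return False
-- ===== SOURCE B (Python) =====
-- from collections import Counter
--
-- def real_info(info):
--     keys = list(info)
--     rows = zip(*(info[k] for k in keys))
--     kept = [row for row, name, chk in zip(rows, info['name'], info['checksum'])
--             if valid(name, chk)]
--     for j, key in enumerate(keys):
--         info[key] = [row[j] for row in kept]
--     return info
--
-- def top_counts(name):
--     counts = Counter(name.replace('-', ''))
--     counts = sorted(counts.items(), key=lambda x: x[0])
--     counts.sort(key=lambda x: x[1], reverse=True)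
--     top = [k[0] for k in counts][:5]
--     return top
--
-- def valid(name, checksum, min_match=5):
--     results = [n in top_counts(name) for n in checksum]
--     if sum(results) == min_match:
--         return True
--     else:
--         return False
-- ===== Notes on version B (the rewrite author's own statement) =====
-- stated objective: alternative
-- what changed: A collects a list of surviving row indices and then re-filters every column by indexing into it; B zips the columns into row tuples, keeps the valid rows in one pass, and transposes the kept rows back into the columns (the module helpers top_counts/valid are shared verbatim).
import Mathlib
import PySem

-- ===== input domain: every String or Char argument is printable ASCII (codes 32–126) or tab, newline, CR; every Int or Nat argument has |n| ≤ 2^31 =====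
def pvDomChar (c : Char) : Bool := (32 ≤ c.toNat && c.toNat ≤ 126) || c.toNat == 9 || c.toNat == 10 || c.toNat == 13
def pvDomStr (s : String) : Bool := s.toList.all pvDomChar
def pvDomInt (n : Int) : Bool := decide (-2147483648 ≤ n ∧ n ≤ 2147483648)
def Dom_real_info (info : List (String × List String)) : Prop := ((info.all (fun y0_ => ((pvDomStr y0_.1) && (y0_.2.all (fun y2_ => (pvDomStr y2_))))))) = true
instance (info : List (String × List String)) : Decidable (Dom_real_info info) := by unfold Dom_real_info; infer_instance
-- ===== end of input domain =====

-- B reorganises A's index-collect-then-filter-each-column into one row-wise pass (zip the columns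
-- into rows, filter the rows, transpose back); the helpers top_counts/valid are the module's own and
-- are shared verbatim by both ports. The Python A (and B) mutate the dict argument in place; the
-- equivalence proved here is about the returned dict's contents.

-- shared module helpers (identical in Source A and Source B): Counter over the name with '-' removed,
-- sort items by key, then stably by count descending, take the first five characters ([:5] ported
-- as PySem.List.slice none (some 5))
def top_counts (name : String) : List Char :=
  let counts0 := PySem.Dict.counter (PySem.Str.replace name "-" "").toList
  let counts1 := PySem.List.sorted counts0.items (fun x => x.1) false
  let counts2 := PySem.List.sorted counts1 (fun x => x.2) true
  PySem.List.slice (counts2.map (fun k => k.1)) none (some 5)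

-- valid(name, checksum) with the default min_match=5 (the only way A and B call it)
def valid_ab (name checksum : String) : Bool :=
  let results := checksum.toList.map (fun n => (top_counts name).contains n)
  if (results.map (fun b => if b then (1 : Int) else 0)).sum = 5 then true else false

-- ===== PORT A =====
-- info['name'] / info['checksum'] raise KeyError when absent, and info[key][i] raises IndexError
-- when a surviving index i is out of range for a column: both are excluded by Pre_real_info, so
-- the .getD defaults below are never reached on admitted inputs.
def real_info (info : List (String × List String)) : List (String × List String) :=
  let d := PySem.Dict.ofList info
  let names := (d.get? "name").getD []
  let checks := (d.get? "checksum").getD []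
  let realIndex := (PySem.List.enumerate (names.zip checks) 0).foldl
      (fun acc p => if valid_ab p.2.1 p.2.2 then acc ++ [p.1] else acc) []
  (d.keys.foldl (fun dd key =>
      dd.insert key (realIndex.map (fun i => PySem.List.pyGetD (dd.getD key []) i ""))) d).items

-- ===== PORT B =====
-- zip(*cols): transpose truncated at the shortest column; zip() of no columns is empty
def pvZipStar : List (List String) → List (List String)
  | [] => []
  | c :: rest =>
    if ((c :: rest).any List.isEmpty) then []
    else ((c :: rest).map (fun col => col.headD "")) :: pvZipStar ((c :: rest).map List.tail)
termination_by cols => (cols.headD []).length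
decreasing_by
  rename_i h
  simp only [List.any_cons, Bool.or_eq_true, List.isEmpty_iff] at h
  push Not at h
  simp only [List.map_cons, List.headD_cons]
  cases c with
  | nil => exact absurd rfl h.1
  | cons x xs => simp

def real_info_alt (info : List (String × List String)) : List (String × List String) :=
  let d := PySem.Dict.ofList info
  let keys := d.keys
  let rows := pvZipStar (keys.map (fun k => d.getD k []))
  let kept := ((rows.zip (((d.get? "name").getD []).zip ((d.get? "checksum").getD []))).filter
      (fun p => valid_ab p.2.1 p.2.2)).map (fun p => p.1)
  ((PySem.List.enumerate keys 0).foldl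
      (fun dd p => dd.insert p.2 (kept.map (fun row => PySem.List.pyGetD row p.1 ""))) d).items

-- ===== PRECONDITION & SPEC =====
-- Pre_ is exactly the inputs where A returns: the dict has 'name' and 'checksum' keys (else
-- KeyError), and every row index that survives the checksum test is in range for every column
-- (else info[key][i] raises IndexError).
def Pre_real_info (info : List (String × List String)) : Prop :=
  let d := PySem.Dict.ofList info
  let nc := (((d.get? "name").getD []).zip ((d.get? "checksum").getD []))
  d.contains "name" = true ∧ d.contains "checksum" = true ∧
  ∀ i : Nat, i < nc.length → valid_ab (nc.getD i ("", "")).1 (nc.getD i ("", "")).2 = true →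
    ∀ p ∈ d.items, i < p.2.length

instance (info : List (String × List String)) : Decidable (Pre_real_info info) := by
  unfold Pre_real_info; infer_instance

def pvWitness_real_info : (List (String × List String)) :=
  [("name", ["aabbc-x"]), ("checksum", ["abcxy"]), ("sector", ["404"])]

def Spec_real_info (info : List (String × List String)) (out : List (String × List String)) : Prop := out = real_info_alt info
instance (info : List (String × List String)) (out : List (String × List String)) : Decidable (Spec_real_info info out) := by unfold Spec_real_info; infer_instance

-- ===== CLAIM (what is proved, stated in full; the proofs are below) =====
def Claim_equal_real_info : Prop := ∀ (info : List (String × List String)), Dom_real_info info → Pre_real_info info → Spec_real_info info (real_info info)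
-- ===== LEMMAS AND PROOFS =====

-- A's key loop: folding insert over a Nodup list of keys all present in the dict rewrites each
-- item's value in place, and every read dd.getD k [] still sees the original value.

theorem fold_insert_read (F : String → List String → List String) :
    ∀ (ks : List String) (dd : PySem.Dict String (List String)), ks.Nodup →
      (∀ k ∈ ks, dd.contains k = true) →
      (ks.foldl (fun dd k => dd.insert k (F k (dd.getD k []))) dd).items
        = dd.items.map (fun p => if p.1 ∈ ks then (p.1, F p.1 (dd.getD p.1 [])) else p) := by
  intro ks
  induction ks with
  | nil =>
    intro dd _ _
    simp
  | cons k rest ih =>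
    intro dd hnd hc
    have hck : dd.contains k = true := hc k (by simp)
    have hnd' := hnd
    rw [List.nodup_cons] at hnd'
    simp only [List.foldl_cons]
    rw [ih (dd.insert k (F k (dd.getD k []))) hnd'.2
        (by intro k' hk'; rw [PySem.Dict.contains_insert]
            simp [hc k' (by simp [hk'])])]
    rw [PySem.Dict.items_insert_of_contains _ _ hck, List.map_map]
    apply List.map_congr_left
    intro p _
    by_cases hpk : p.1 = k
    · have : (p.1 == k) = true := by simp [hpk]
      simp only [Function.comp_apply, this, if_pos]
      have hknr : k ∉ rest := hnd'.1
      simp [hknr, hpk]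
    · have : (p.1 == k) = false := by simp [hpk]
      simp only [Function.comp_apply, this]
      by_cases hpr : p.1 ∈ rest
      · simp only [Bool.false_eq_true, if_false, if_pos hpr]
        rw [PySem.Dict.getD_insert_of_ne _ _ _ hpk]
        simp [hpr, hpk]
      · simp [hpr, hpk]

-- B's key loop: folding insert over (index, key) tokens with Nodup keys and values independent of
-- the evolving dict.

theorem fold_insert_tok (G : Int × String → List String) :
    ∀ (ts : List (Int × String)) (dd : PySem.Dict String (List String)),
      (ts.map (fun t => t.2)).Nodup →
      (∀ t ∈ ts, dd.contains t.2 = true) →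
      (ts.foldl (fun dd t => dd.insert t.2 (G t)) dd).items
        = dd.items.map (fun p =>
            match ts.find? (fun t => t.2 == p.1) with
            | some t => (p.1, G t)
            | none => p) := by
  intro ts
  induction ts with
  | nil =>
    intro dd _ _
    simp
  | cons t rest ih =>
    intro dd hnd hc
    have hck : dd.contains t.2 = true := hc t (by simp)
    rw [List.map_cons, List.nodup_cons] at hnd
    simp only [List.foldl_cons]
    rw [ih (dd.insert t.2 (G t)) hnd.2
        (by intro t' ht'; rw [PySem.Dict.contains_insert]
            simp [hc t' (by simp [ht'])])]
    rw [PySem.Dict.items_insert_of_contains _ _ hck, List.map_map]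
    apply List.map_congr_left
    intro p _
    by_cases hpk : t.2 = p.1
    · have hb : (p.1 == t.2) = true := by simp [hpk]
      have hfind : rest.find? (fun t' => t'.2 == p.1) = none := by
        rw [List.find?_eq_none]
        intro x hx
        simp only [beq_iff_eq]
        intro he
        exact hnd.1 (by rw [hpk, ← he]; exact List.mem_map_of_mem hx)
      simp [Function.comp, hpk, hfind]
    · have hb : (p.1 == t.2) = false := by simp [Ne.symm hpk]
      have hb2 : (t.2 == p.1) = false := by simp [hpk]
      simp [Function.comp, hb, hb2]

-- find? over an enumeration of a Nodup list locates a member key at its idxOf position.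
theorem find?_enumerate_nodup :
    ∀ (l : List String) (s : Int) (k : String), l.Nodup → k ∈ l →
      (PySem.List.enumerate l s).find? (fun t => t.2 == k) = some (s + (l.idxOf k : Int), k) := by
  intro l
  induction l with
  | nil => intro s k _ h; simp at h
  | cons a l ih =>
    intro s k hnd hm
    rw [List.nodup_cons] at hnd
    rw [PySem.List.enumerate_cons, List.find?_cons]
    by_cases hak : a = k
    · subst hak
      simp
    · have : (a == k) = false := by simp [hak]
      rw [this]
      have hm' : k ∈ l := by cases hm with
        | head => exact absurd rfl hak
        | tail _ h => exact h
      rw [ih (s + 1) k hnd.2 hm']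
      have : (a :: l).idxOf k = l.idxOf k + 1 := by
        simp [hak]
      rw [this]
      push_cast
      ring_nf


-- pvZipStar of nonempty columns, all of length ≥ m and one of length exactly m, is the m-row transpose.
theorem pvZipStar_eq' :
    ∀ (m : Nat) (cols : List (List String)), cols ≠ [] →
      (∀ c ∈ cols, m ≤ c.length) → (∃ c ∈ cols, c.length = m) →
      pvZipStar cols = (List.range m).map (fun i => cols.map (fun c => c.getD i "")) := by
  intro m
  induction m with
  | zero =>
    intro cols hne _ hex
    obtain ⟨c, hc, hc0⟩ := hex
    have hcE : c = [] := List.length_eq_zero_iff.mp hc0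
    match cols, hne with
    | c0 :: rest, _ =>
      rw [pvZipStar.eq_def]
      have : ((c0 :: rest).any List.isEmpty) = true := by
        rw [List.any_eq_true]
        exact ⟨c, hc, by simp [hcE]⟩
      simp [this]
  | succ m ih =>
    intro cols hne hall hex
    match cols, hne with
    | c0 :: rest, _ =>
      rw [pvZipStar.eq_def]
      have hnoemp : ((c0 :: rest).any List.isEmpty) = false := by
        rw [List.any_eq_false]
        intro c hc
        have := hall c hc
        simp only [List.isEmpty_iff]
        intro hce
        rw [hce] at this; simp at this
      simp only [hnoemp, Bool.false_eq_true, if_false]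
      have htail : ∀ c ∈ (c0 :: rest), c.tail.length = c.length - 1 := by
        intro c _; simp
      rw [ih ((c0 :: rest).map List.tail) (by simp)
          (by intro c hc
              obtain ⟨c', hc', rfl⟩ := List.mem_map.mp hc
              have := hall c' hc'
              simp; omega)
          (by obtain ⟨c, hc, hcl⟩ := hex
              exact ⟨c.tail, List.mem_map_of_mem hc, by simp [hcl]⟩)]
      rw [List.range_succ_eq_map]
      conv_rhs => rw [List.map_cons, List.map_map]
      congr 1
      · apply List.map_congr_left
        intro c hc
        have hcne : c ≠ [] := by
          intro hce
          have := hall c hc; rw [hce] at this; simp at this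
        match c, hcne with
        | x :: xs, _ => simp
      · apply List.map_congr_left
        intro i _
        simp only [Function.comp_apply, List.map_map]
        apply List.map_congr_left
        intro c hc
        have hcne : c ≠ [] := by
          intro hce
          have := hall c hc; rw [hce] at this; simp at this
        match c, hcne with
        | x :: xs, _ => simp [Nat.succ_eq_add_one]

-- filtering rows indexed by a range against filtering an enumeration of the same list

theorem filter_zip_range {α β : Type} (g : Nat → α) (P : β → Bool) :
    ∀ (l : List β) (s : Nat),
      ((((List.range l.length).map (fun i => g (s + i))).zip l).filter
          (fun p => P p.2)).map (fun p => p.1)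
        = (((PySem.List.enumerate l (s : Int)).filter (fun p => P p.2)).map
            (fun p => p.1)).map (fun i => g i.toNat) := by
  intro l
  induction l with
  | nil => intro s; simp
  | cons b l ih =>
    intro s
    rw [List.length_cons, List.range_succ_eq_map, List.map_cons, List.map_map,
        PySem.List.enumerate_cons]
    have hmap : (List.map ((fun i => g (s + i)) ∘ Nat.succ) (List.range l.length))
        = List.map (fun i => g ((s + 1) + i)) (List.range l.length) := by
      apply List.map_congr_left
      intro i _
      simp only [Function.comp_apply, Nat.succ_eq_add_one]
      congr 1
      omega
    rw [hmap, List.zip_cons_cons, List.filter_cons, List.filter_cons]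
    have hcast : (s : Int) + 1 = ((s + 1 : Nat) : Int) := by push_cast; ring
    by_cases hP : P b = true
    · simp only [hP, if_pos, List.map_cons]
      rw [hcast, ih (s + 1)]
      simp
    · simp only [hP, Bool.false_eq_true, if_false]
      rw [hcast, ih (s + 1)]

theorem filter_zip_range_zero {α β : Type} (g : Nat → α) (P : β → Bool) (l : List β) :
    ((((List.range l.length).map g).zip l).filter (fun p => P p.2)).map (fun p => p.1)
      = (((PySem.List.enumerate l 0).filter (fun p => P p.2)).map
          (fun p => p.1)).map (fun i => g i.toNat) := by
  have h0 : (List.range l.length).map g = (List.range l.length).map (fun i => g (0 + i)) := by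
    apply List.map_congr_left; intro i _; simp
  rw [h0]
  have := filter_zip_range g P l 0
  simpa using this

theorem zip_take_self {α β : Type} : ∀ (l1 : List α) (l2 : List β),
    l1.zip l2 = l1.zip (l2.take l1.length) := by
  intro l1
  induction l1 with
  | nil => simp
  | cons a l ih =>
    intro l2
    cases l2 with
    | nil => simp
    | cons b t => simp [List.zip_cons_cons, ih t]

-- the two ports agree item by item
theorem real_info_eq (info : List (String × List String)) (hpre : Pre_real_info info) :
    real_info info = real_info_alt info := by
  unfold Pre_real_info at hpre
  obtain ⟨hn, hcs, hvalid⟩ := hpre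
  unfold real_info real_info_alt
  dsimp only
  set d := PySem.Dict.ofList info with hd
  set names := (d.get? "name").getD [] with hnames
  set checks := (d.get? "checksum").getD [] with hchecks
  set cols := d.keys.map (fun k => d.getD k []) with hcols
  have hnodup : d.keys.Nodup := PySem.Dict.nodup_keys_ofList info
  have hcont : ∀ k ∈ d.keys, d.contains k = true := by
    intro k hk; exact (PySem.Dict.contains_iff_mem_keys d k).mpr hk
  have hitems : ∀ c ∈ cols, ∃ q ∈ d.items, q.2 = c := by
    intro c hc
    obtain ⟨k, hk, rfl⟩ := List.mem_map.mp hc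
    have : ∃ v, d.get? k = some v := by
      rcases h : d.get? k with _ | v
      · rw [PySem.Dict.get?_eq_none_iff_not_mem_keys] at h
        exact absurd hk h
      · exact ⟨v, rfl⟩
    obtain ⟨v, hv⟩ := this
    refine ⟨(k, v), (PySem.Dict.get?_eq_some_iff_mem_items d k v hnodup).mp hv, ?_⟩
    rw [PySem.Dict.getD_eq_get?_getD, hv]
    rfl
  have hnamemem : names ∈ cols := by
    have hk : "name" ∈ d.keys := (PySem.Dict.contains_iff_mem_keys d _).mp hn
    have h1 : names = d.getD "name" [] := (PySem.Dict.getD_eq_get?_getD d "name" []).symm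
    rw [h1, hcols]
    exact List.mem_map_of_mem hk
  have hcolsne : cols ≠ [] := by
    intro h; rw [h] at hnamemem; exact absurd hnamemem (List.not_mem_nil)
  -- M = the length of the shortest column (where zip(*cols) stops)
  obtain ⟨M, hM⟩ : ∃ m, (cols.map List.length).min? = some m := by
    rcases h : (cols.map List.length).min? with _ | m
    · rw [List.min?_eq_none_iff] at h
      exact absurd (List.map_eq_nil_iff.mp h) hcolsne
    · exact ⟨m, rfl⟩
  obtain ⟨hMmem, hMle⟩ := List.min?_eq_some_iff.mp hM
  have hMall : ∀ c ∈ cols, M ≤ c.length := by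
    intro c hc; exact hMle c.length (List.mem_map_of_mem hc)
  have hMex : ∃ c ∈ cols, c.length = M := by
    obtain ⟨c, hc, hcl⟩ := List.mem_map.mp hMmem
    exact ⟨c, hc, hcl⟩
  have hchkmem : checks ∈ cols := by
    have hk : "checksum" ∈ d.keys := (PySem.Dict.contains_iff_mem_keys d _).mp hcs
    have h1 : checks = d.getD "checksum" [] := (PySem.Dict.getD_eq_get?_getD d "checksum" []).symm
    rw [h1, hcols]
    exact List.mem_map_of_mem hk
  have hML : M ≤ (names.zip checks).length := by
    have h1 := hMall names hnamemem
    have h2 := hMall checks hchkmem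
    rw [List.length_zip]
    omega
  have htk : ((names.zip checks).take M).length = M := by
    rw [List.length_take, List.length_zip]
    have h1 := hMall names hnamemem
    have h2 := hMall checks hchkmem
    omega
  -- B's rows are the M-row transpose of the columns
  rw [pvZipStar_eq' M cols hcolsne hMall hMex]
  -- both key loops rewrite each item's value in place
  rw [fold_insert_read
        (fun k v => (((PySem.List.enumerate (names.zip checks) 0).foldl
            (fun acc p => if valid_ab p.2.1 p.2.2 then acc ++ [p.1] else acc) []).map
          (fun i => PySem.List.pyGetD v i "")))
        d.keys d hnodup hcont]
  rw [fold_insert_tok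
        (fun t => ((((List.range M).map
              (fun i => cols.map (fun c => c.getD i ""))).zip (names.zip checks)).filter
            (fun p => valid_ab p.2.1 p.2.2)).map (fun p => p.1) |>.map
          (fun row => PySem.List.pyGetD row t.1 ""))
        (PySem.List.enumerate d.keys 0) d
        (by rw [PySem.List.map_snd_enumerate]; exact hnodup)
        (by intro t ht
            obtain ⟨k, hk, rfl⟩ := (PySem.List.mem_enumerate_iff _ _ _).mp ht
            exact hcont _ (List.getElem_mem hk))]
  apply List.map_congr_left
  intro p hp
  rw [find?_enumerate_nodup d.keys 0 p.1 hnodup (PySem.Dict.mem_keys_of_mem_items d hp)]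
  simp only [PySem.Dict.mem_keys_of_mem_items d hp, if_pos, zero_add]
  have hgetD : d.getD p.1 [] = p.2 := by
    obtain ⟨a, b⟩ := p
    exact PySem.Dict.getD_of_mem_items d hp hnodup []
  rw [hgetD]
  -- B's zip truncates name/checksum rows at M
  have hzipt : ((List.range M).map (fun i => cols.map (fun c => c.getD i ""))).zip
        (names.zip checks)
      = ((List.range ((names.zip checks).take M).length).map
          (fun i => cols.map (fun c => c.getD i ""))).zip ((names.zip checks).take M) := by
    rw [zip_take_self, List.length_map, List.length_range, htk]
  rw [hzipt]
  rw [filter_zip_range_zero (fun i => cols.map (fun c => c.getD i ""))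
        (fun q => valid_ab q.1 q.2) ((names.zip checks).take M)]
  -- A's surviving indices: the loop is a filter, and no index ≥ M survives
  rw [PySem.List.foldl_append_if (fun q => valid_ab q.2.1 q.2.2) (fun q => q.1)
        (PySem.List.enumerate (names.zip checks) 0) []]
  rw [List.nil_append]
  have hbase : ((PySem.List.enumerate (names.zip checks) 0).filter
        (fun q => valid_ab q.2.1 q.2.2)).map (fun q => q.1)
      = ((PySem.List.enumerate ((names.zip checks).take M) 0).filter
          (fun q => valid_ab q.2.1 q.2.2)).map (fun q => q.1) := by
    conv_lhs => rw [← List.take_append_drop M (names.zip checks)]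
    rw [PySem.List.enumerate_append, List.filter_append]
    have hnil : ((PySem.List.enumerate ((names.zip checks).drop M)
          (0 + (((names.zip checks).take M).length : Int))).filter
        (fun q => valid_ab q.2.1 q.2.2)) = [] := by
      rw [List.filter_eq_nil_iff]
      intro q hq
      obtain ⟨k, hk, rfl⟩ := (PySem.List.mem_enumerate_iff _ _ _).mp hq
      intro hP
      have hklt : M + k < (names.zip checks).length := by
        rw [List.length_drop] at hk
        omega
      have hdropel : ((names.zip checks).drop M)[k] = (names.zip checks)[M + k] :=
        List.getElem_drop
      have hgd : (names.zip checks).getD (M + k) ("", "") = (names.zip checks)[M + k] :=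
        List.getD_eq_getElem _ _ hklt
      have hv := hvalid (M + k) hklt (by rw [hgd, ← hdropel]; simpa using hP)
      obtain ⟨c, hc, hcM⟩ := hMex
      obtain ⟨qq, hqq, hqc⟩ := hitems c hc
      have := hv qq hqq
      rw [hqc, hcM] at this
      omega
    rw [hnil, List.append_nil]
  rw [hbase]
  congr 1
  simp only [List.map_map]
  apply List.map_congr_left
  intro q hq
  obtain ⟨hqe, _⟩ := List.mem_filter.mp hq
  obtain ⟨k, hk, rfl⟩ := (PySem.List.mem_enumerate_iff _ _ _).mp hqe
  simp only [Function.comp_apply, zero_add]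
  have hjn : d.keys.idxOf p.1 < cols.length := by
    rw [hcols, List.length_map]
    exact List.idxOf_lt_length_of_mem (PySem.Dict.mem_keys_of_mem_items d hp)
  rw [PySem.List.pyGetD_natCast, PySem.List.pyGetD_natCast]
  have hjn2 : d.keys.idxOf p.1 < (cols.map (fun c => c.getD (↑k : Int).toNat "")).length := by
    simpa using hjn
  have hlt : d.keys.idxOf p.1 < d.keys.length := by
    rw [hcols, List.length_map] at hjn; exact hjn
  have hcolel : cols[d.keys.idxOf p.1]'hjn = d.getD p.1 [] := by
    calc cols[d.keys.idxOf p.1]'hjn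
        = d.getD (d.keys[d.keys.idxOf p.1]'hlt) [] := by
          simp [hcols]
      _ = d.getD p.1 [] := by rw [List.getElem_idxOf hlt]
  rw [List.getD_eq_getElem _ _ hjn2]
  simp only [List.getElem_map]
  rw [hcolel, hgetD]
  simp

-- ===== VERDICT (by name: the statement is the Claim_ definition above) =====
theorem real_info_spec : Claim_equal_real_info := by
  intro info _ hpre
  exact real_info_eq info hpre
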